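-- pv_equiv track=rewrite | github.com/seiforesti/final_step | data_wave/backend/scripts_automation/app/utils/cache.py | _simple_wildcard_match
-- ===== SOURCE A (Python) =====
-- def _simple_wildcard_match(key: str, pattern: str) -> bool:
--     """Fallback simple wildcard matching (original algorithm enhanced)."""
--     if '*' not in pattern:
--         return key == pattern
--
--     # Enhanced wildcard matching with better edge case handling
--     pattern_parts = pattern.split('*')
--     key_pos = 0
--
--     # Handle empty pattern parts (consecutive *)
--     pattern_parts = [part for part in pattern_parts if part]
--
--     if not pattern_parts:
--         return True  # Pattern is just '*' or '**', matches everything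
--
--     for i, part in enumerate(pattern_parts):
--         if i == 0:  # First part - must match start
--             if not key[key_pos:].startswith(part):
--                 return False
--             key_pos += len(part)
--         elif i == len(pattern_parts) - 1:  # Last part - must match end
--             if not key.endswith(part):
--                 return False
--             # Verify there's enough space for this part
--             expected_end_pos = len(key) - len(part)
--             if key_pos > expected_end_pos:
--                 return False
--         else:  # Middle parts - find in remaining string
--             remaining_key = key[key_pos:]
--             pos = remaining_key.find(part)
--             if pos == -1:
--                 return False
--             key_pos += pos + len(part)
--
--     return True
-- ===== SOURCE B (Python) =====
-- def _tail(s, parts):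
--     """Does s match the regex  .*p1.*p2...*pk$  for parts = [p1,...,pk]?
--     Backtracking over every split position instead of a greedy scan."""
--     if not parts:
--         return s == ''
--     p = parts[0]
--     return any(s[i:i + len(p)] == p and _tail(s[i + len(p):], parts[1:])
--                for i in range(len(s) + 1))
--
--
-- def _simple_wildcard_match(key: str, pattern: str) -> bool:
--     """Recursive backtracking matcher: after the mandatory prefix part, try
--     every placement of the remaining parts (an existential search), instead
--     of A's single greedy left-to-right find scan."""
--     if '*' not in pattern:
--         return key == pattern
--     parts = [p for p in pattern.split('*') if p]
--     if not parts:
--         return True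
--     if not key.startswith(parts[0]):
--         return False
--     rest = parts[1:]
--     if not rest:
--         return True
--     return _tail(key[len(parts[0]):], rest)
-- ===== Notes on version B (the rewrite author's own statement) =====
-- stated objective: alternative
-- what changed: Replaces A's single greedy left-to-right scan (startswith prefix, find for each middle part, endswith plus a position check for the last part, all driven by a key_pos cursor) with a recursive backtracking matcher: after the mandatory prefix part, _tail existentially tries every placement of each remaining part over all split positions, with no cursor, no find and no endswith phase.
import Mathlib
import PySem

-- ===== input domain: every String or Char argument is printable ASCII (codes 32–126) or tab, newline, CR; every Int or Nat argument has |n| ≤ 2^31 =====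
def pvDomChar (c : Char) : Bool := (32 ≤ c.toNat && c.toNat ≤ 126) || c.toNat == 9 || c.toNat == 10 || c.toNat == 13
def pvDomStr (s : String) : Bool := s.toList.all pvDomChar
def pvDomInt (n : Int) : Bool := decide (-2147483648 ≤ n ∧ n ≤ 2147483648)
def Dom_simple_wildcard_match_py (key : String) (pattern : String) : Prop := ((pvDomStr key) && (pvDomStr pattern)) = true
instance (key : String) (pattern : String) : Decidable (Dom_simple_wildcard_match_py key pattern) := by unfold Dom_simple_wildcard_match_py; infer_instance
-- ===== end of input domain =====

-- B replaces A's greedy three-phase find scan by a recursive backtracking matcher that tries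
-- every placement of the parts after the mandatory prefix part (objective: alternative).

-- ===== PORT A =====
-- the for-loop over enumerate(pattern_parts): i is the index, n = len(pattern_parts), key_pos the Python key_pos
def pvALoop (key : List Char) (n : Nat) (i : Nat) (key_pos : Int) : List (List Char) → Bool
  | [] => true
  | part :: rest =>
    if i = 0 then
      if PySem.Chars.startswith (PySem.Chars.slice key (some key_pos) none) part = false then false
      else pvALoop key n (i + 1) (key_pos + part.length) rest
    else if i = n - 1 then
      if PySem.Chars.endswith key part = false then false
      else
        let expected_end_pos : Int := (key.length : Int) - part.length
        if key_pos > expected_end_pos then false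
        else pvALoop key n (i + 1) key_pos rest
    else
      let remaining := PySem.Chars.slice key (some key_pos) none
      let pos := PySem.Chars.find remaining part
      if pos = -1 then false
      else pvALoop key n (i + 1) (key_pos + pos + part.length) rest

def simple_wildcard_match_py (key : String) (pattern : String) : Bool :=
  if PySem.Str.isIn "*" pattern = false then key == pattern
  else
    let pattern_parts := (PySem.Chars.splitOn pattern.toList ['*']).filter (fun p => !p.isEmpty)
    if pattern_parts.isEmpty then true
    else pvALoop key.toList pattern_parts.length 0 0 pattern_parts

-- ===== PORT B =====
-- _tail(s, parts): structural recursion on parts; the generator `any(... for i in range(len(s)+1))`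
-- is List.any over List.range (s.length + 1); the slice s[i:i+len(p)] with 0 ≤ i ≤ len(s) is
-- exactly (s.drop i).take p.length
def pvTail : List Char → List (List Char) → Bool
  | s, [] => s.isEmpty
  | s, p :: ps =>
    (List.range (s.length + 1)).any
      (fun i => ((s.drop i).take p.length == p) && pvTail (s.drop (i + p.length)) ps)

def simple_wildcard_match_py_alt (key : String) (pattern : String) : Bool :=
  if PySem.Str.isIn "*" pattern = false then key == pattern
  else
    match (PySem.Chars.splitOn pattern.toList ['*']).filter (fun p => !p.isEmpty) with
    | [] => true
    | first :: rest =>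
      if PySem.Chars.startswith key.toList first = false then false
      else if rest = [] then true
      else pvTail (key.toList.drop first.length) rest

-- ===== PRECONDITION & SPEC =====
def Spec_simple_wildcard_match_py (key : String) (pattern : String) (out : Bool) : Prop := out = simple_wildcard_match_py_alt key pattern
instance (key : String) (pattern : String) (out : Bool) : Decidable (Spec_simple_wildcard_match_py key pattern out) := by unfold Spec_simple_wildcard_match_py; infer_instance

-- ===== CLAIM (what is proved, stated in full; the proofs are below) =====
def Claim_equal_simple_wildcard_match_py : Prop := ∀ (key : String) (pattern : String), Dom_simple_wildcard_match_py key pattern → Spec_simple_wildcard_match_py key pattern (simple_wildcard_match_py key pattern)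

-- ===== LEMMAS AND PROOFS =====

lemma pvTail_cons_iff (p : List Char) (ps : List (List Char)) (s : List Char) :
    pvTail s (p :: ps) = true ↔
      ∃ i, i ≤ s.length ∧ p <+: s.drop i ∧ pvTail (s.drop (i + p.length)) ps = true := by
  simp only [pvTail, List.any_eq_true, List.mem_range, Nat.lt_succ_iff, Bool.and_eq_true,
    beq_iff_eq]
  constructor
  · rintro ⟨i, hi, hpre, ht⟩
    exact ⟨i, hi, by rw [List.prefix_iff_eq_take, hpre], ht⟩
  · rintro ⟨i, hi, hpre, ht⟩
    exact ⟨i, hi, ((List.prefix_iff_eq_take).mp hpre).symm, ht⟩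

-- matchability of a NONEMPTY part list is monotone when the start position moves left
lemma pvTail_mono (K : List Char) (q : List Char) (qs : List (List Char)) (a b : Nat)
    (hab : a ≤ b) (hbK : b ≤ K.length)
    (h : pvTail (K.drop b) (q :: qs) = true) : pvTail (K.drop a) (q :: qs) = true := by
  rw [pvTail_cons_iff] at h ⊢
  obtain ⟨i, hi, hpre, ht⟩ := h
  refine ⟨b - a + i, ?_, ?_, ?_⟩
  · simp only [List.length_drop] at hi ⊢
    omega
  · rw [List.drop_drop] at hpre
    rw [List.drop_drop, show a + (b - a + i) = b + i by omega]
    exact hpre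
  · rw [List.drop_drop] at ht
    rw [List.drop_drop, show a + (b - a + i + q.length) = b + (i + q.length) by omega]
    exact ht

-- the core correspondence: A's greedy scan over mids++[last] from position kp equals
-- B's backtracking matcher on the suffix K.drop kp
lemma pvALoop_eq_pvTail (K last : List Char) (n : Nat) :
    ∀ (mids : List (List Char)) (i : Nat) (kp : Nat), 1 ≤ i → i + mids.length + 1 = n →
      kp ≤ K.length →
      pvALoop K n i (kp : Int) (mids ++ [last]) = pvTail (K.drop kp) (mids ++ [last]) := by
  intro mids
  induction mids with
  | nil =>
    intro i kp h1 hn hkp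
    simp only [List.length_nil] at hn
    simp only [List.nil_append, pvALoop]
    rw [if_neg (show ¬ i = 0 by omega), if_pos (show i = n - 1 by omega)]
    rw [Bool.eq_iff_iff, pvTail_cons_iff]
    constructor
    · intro h
      by_cases hE : PySem.Chars.endswith K last = false
      · rw [if_pos hE] at h; exact absurd h (by simp)
      · rw [if_neg hE] at h
        have hE' : last <:+ K := (PySem.Chars.endswith_iff _ _).mp (by simpa using hE)
        by_cases hgt : (kp : Int) > (K.length : Int) - (last.length : Int)
        · rw [if_pos hgt] at h; exact absurd h (by simp)
        · have hlK : last.length ≤ K.length := hE'.length_le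
          refine ⟨K.length - last.length - kp, ?_, ?_, ?_⟩
          · simp only [List.length_drop]; omega
          · rw [List.drop_drop, show kp + (K.length - last.length - kp) = K.length - last.length
              by omega, ← List.suffix_iff_eq_drop.mp hE']
          · rw [List.drop_drop]
            simp only [pvTail, List.isEmpty_iff, List.drop_eq_nil_iff]
            omega
    · rintro ⟨j, hj, hpre, ht⟩
      simp only [pvTail, List.isEmpty_iff, List.drop_eq_nil_iff, List.length_drop] at ht
      simp only [List.length_drop] at hj
      have hlen : last.length ≤ (K.drop kp |>.drop j).length := hpre.length_le
      simp only [List.length_drop] at hlen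
      have heq : last = (K.drop kp).drop j := by
        refine hpre.sublist.eq_of_length ?_
        simp only [List.length_drop]; omega
      have hE' : last <:+ K := by
        rw [heq, List.drop_drop]; exact List.drop_suffix _ _
      rw [if_neg (by rw [(PySem.Chars.endswith_iff _ _).mpr hE']; simp)]
      rw [if_neg (by omega)]
  | cons m ms ih =>
    intro i kp h1 hn hkp
    simp only [List.length_cons] at hn
    simp only [List.cons_append, pvALoop]
    rw [if_neg (show ¬ i = 0 by omega), if_neg (show ¬ i = n - 1 by omega)]
    have hsl : PySem.Chars.slice K (some (kp : Int)) none = K.drop kp := by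
      rw [PySem.Chars.slice_eq_listSlice, PySem.List.slice_from_natCast]
    rw [hsl]
    set s := K.drop kp with hs
    by_cases hf : PySem.Chars.find s m = -1
    · rw [if_pos hf]
      have hnin : ¬ m <:+: s := (PySem.Chars.find_eq_neg_one_iff s m).mp hf
      rw [Bool.eq_iff_iff]
      simp only [Bool.false_eq_true, false_iff]
      rw [pvTail_cons_iff]
      rintro ⟨j, hj, hpre, -⟩
      exact hnin (hpre.isInfix.trans (List.drop_suffix j s).isInfix)
    · rw [if_neg hf]
      have hp0 : (0 : Int) ≤ PySem.Chars.find s m := by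
        have := PySem.Chars.neg_one_le_find s m; omega
      obtain ⟨hpre, hmin⟩ := PySem.Chars.find_spec hp0
      set pn := (PySem.Chars.find s m).toNat with hpn
      have hpcast : PySem.Chars.find s m = (pn : Int) := (Int.toNat_of_nonneg hp0).symm
      have hplen : m.length ≤ (s.drop pn).length := hpre.length_le
      simp only [List.length_drop, hs, List.length_drop] at hplen
      have hple : pn ≤ s.length := by
        have h2 := PySem.Chars.find_le_length s m
        rw [hpcast] at h2
        exact_mod_cast h2
      simp only [hs, List.length_drop] at hple
      have hkp' : kp + pn + m.length ≤ K.length := by omega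
      have harith : (kp : Int) + PySem.Chars.find s m + (m.length : Nat) =
          ((kp + pn + m.length : Nat) : Int) := by rw [hpcast]; omega
      rw [harith, ih (i + 1) (kp + pn + m.length) (by omega) (by omega) hkp']
      rw [Bool.eq_iff_iff, pvTail_cons_iff]
      have hdrop : (s.drop (pn + m.length)) = K.drop (kp + pn + m.length) := by
        rw [hs, List.drop_drop]; congr 1; omega
      constructor
      · intro h
        refine ⟨pn, by simp only [hs, List.length_drop]; omega, hpre, ?_⟩
        rwa [hdrop]
      · rintro ⟨j, hj, hjpre, ht⟩
        have hjn : pn ≤ j := by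
          by_contra hc
          exact hmin j (by omega) hjpre
        have hjlen : m.length ≤ (s.drop j).length := hjpre.length_le
        simp only [hs, List.length_drop, List.drop_drop] at hjlen ht hj
        rcases ms with _ | ⟨q, qs⟩
        · -- continuation is [last], nonempty
          exact pvTail_mono K last [] (kp + pn + m.length) (kp + (j + m.length))
            (by omega) (by omega) ht
        · exact pvTail_mono K q (qs ++ [last]) (kp + pn + m.length) (kp + (j + m.length))
            (by omega) (by omega) (by simpa using ht)

-- ===== VERDICT (by name: the statement is the Claim_ definition above) =====
theorem simple_wildcard_match_py_spec : Claim_equal_simple_wildcard_match_py := by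
  unfold Claim_equal_simple_wildcard_match_py Spec_simple_wildcard_match_py
  intro key pattern _
  simp only [simple_wildcard_match_py, simple_wildcard_match_py_alt]
  by_cases hstar : PySem.Str.isIn "*" pattern = false
  · rw [if_pos hstar, if_pos hstar]
  · rw [if_neg hstar, if_neg hstar]
    cases hparts : (PySem.Chars.splitOn pattern.toList ['*']).filter (fun p => !p.isEmpty) with
    | nil => rfl
    | cons first rest =>
      dsimp only
      rw [if_neg (show ¬ ((first :: rest).isEmpty = true) by simp)]
      simp only [pvALoop, if_true]
      have hkey : PySem.Chars.slice key.toList (some 0) none = key.toList := by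
        rw [PySem.Chars.slice_eq_listSlice, PySem.List.slice_zero_start, PySem.List.slice_none_none]
      rw [hkey]
      by_cases hsw : PySem.Chars.startswith key.toList first = false
      · rw [if_pos hsw, if_pos hsw]
      · rw [if_neg hsw, if_neg hsw]
        have hsw' : first <+: key.toList :=
          (PySem.Chars.startswith_iff _ _).mp (by simpa using hsw)
        rcases List.eq_nil_or_concat rest with rfl | ⟨mids, last, rfl⟩
        · simp [pvALoop]
        · simp only [List.concat_eq_append]
          rw [if_neg (show ¬ (mids ++ [last] = []) by simp)]
          have hcast : (0 : Int) + (first.length : Nat) = ((first.length : Nat) : Int) := by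
            omega
          rw [hcast]
          exact pvALoop_eq_pvTail key.toList last _ mids 1 first.length (by omega)
            (by simp; omega) hsw'.length_le
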